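-- pv_equiv track=rewrite | github.com/Sakyi-Ken/DSA-Journey | code-signal/Lesson-4/master_stack.py | find_previous_value
-- ===== SOURCE A (Python) =====
-- def find_previous_value(stack, current_value): #copilot solution
--   # Create a temporary stack to hold popped values
--   temp_stack = []
--   found = False
--
--   # Pop elements from the original stack
--   while stack:
--     value = stack.pop()
--     if value == current_value:
--       found = True
--       break
--     temp_stack.append(value)
--
--   # Push the popped values back onto the original stack
--   while temp_stack:
--     stack.append(temp_stack.pop())
--
--   # If the current value was found, return the previous value
--   if found and stack:
--     return stack[-1]
--   return None
-- ===== SOURCE B (Python) =====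
-- def find_previous_value(stack, current_value):
--     # Single reverse index scan: delete the topmost occurrence in place,
--     # then report the resulting top of the stack (None if empty / not found).
--     for i in range(len(stack) - 1, -1, -1):
--         if stack[i] == current_value:
--             del stack[i]
--             return stack[-1] if stack else None
--     return None
-- ===== Notes on version B (the rewrite author's own statement) =====
-- stated objective: simpler
-- what changed: Replaces the two-phase pop-to-temp-stack / push-back loops with a single reverse index scan that deletes the topmost occurrence in place and returns the new top directly.
import Mathlib
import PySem

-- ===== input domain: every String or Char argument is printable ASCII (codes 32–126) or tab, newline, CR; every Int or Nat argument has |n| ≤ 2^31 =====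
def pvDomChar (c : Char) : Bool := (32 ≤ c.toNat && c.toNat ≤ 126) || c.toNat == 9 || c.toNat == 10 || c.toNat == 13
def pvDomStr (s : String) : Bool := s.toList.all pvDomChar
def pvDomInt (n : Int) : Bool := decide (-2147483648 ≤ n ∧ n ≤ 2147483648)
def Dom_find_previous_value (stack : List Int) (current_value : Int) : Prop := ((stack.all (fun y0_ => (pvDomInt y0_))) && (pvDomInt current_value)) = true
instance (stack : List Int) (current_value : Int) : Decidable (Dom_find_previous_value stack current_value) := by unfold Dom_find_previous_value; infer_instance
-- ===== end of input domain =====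

-- B replaces A's pop-to-temp / push-back loops with one reverse scan deleting the topmost
-- occurrence (simpler decomposition; both mutate the stack identically in Python — the
-- equivalence proved here is about the return value).


-- ===== PORT A =====
-- the `while stack:` loop: pop from the end into temp_stack until current_value is found;
-- returns (remaining stack, temp_stack, found)
def fpvPopLoop (stack temp : List Int) (cv : Int) : List Int × List Int × Bool :=
  if h : stack = [] then (stack, temp, false)
  else
    let value := stack.getLast h          -- value = stack.pop()
    let stack' := stack.dropLast
    if value = cv then (stack', temp, true)
    else fpvPopLoop stack' (temp ++ [value]) cv
termination_by stack.length
decreasing_by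
  simpa [List.length_dropLast] using Nat.sub_lt (List.length_pos_iff.mpr h) one_pos

def find_previous_value (stack : List Int) (current_value : Int) : Option Int :=
  let r := fpvPopLoop stack [] current_value
  -- `while temp_stack: stack.append(temp_stack.pop())` pushes temp back reversed
  let stack2 := r.1 ++ r.2.1.reverse
  if r.2.2 ∧ stack2 ≠ [] then stack2.getLast? else none

-- ===== PORT B =====
-- B's reverse index scan = a left scan of the reversed list: delete the first occurrence
-- there (none if absent), then `stack[-1] if stack else None` = head? of the remainder.
def fpvDelFirst (l : List Int) (cv : Int) : Option (List Int) :=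
  match l with
  | [] => none
  | x :: xs => if x = cv then some xs else (fpvDelFirst xs cv).map (x :: ·)

def find_previous_value_alt (stack : List Int) (current_value : Int) : Option Int :=
  match fpvDelFirst stack.reverse current_value with
  | none => none
  | some rest => rest.head?

-- ===== PRECONDITION & SPEC =====
def Spec_find_previous_value (stack : List Int) (current_value : Int) (out : Option Int) : Prop := out = find_previous_value_alt stack current_value
instance (stack : List Int) (current_value : Int) (out : Option Int) : Decidable (Spec_find_previous_value stack current_value out) := by unfold Spec_find_previous_value; infer_instance

-- ===== CLAIM (what is proved, stated in full; the proofs are below) =====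
def Claim_equal_find_previous_value : Prop := ∀ (stack : List Int) (current_value : Int), Dom_find_previous_value stack current_value → Spec_find_previous_value stack current_value (find_previous_value stack current_value)

-- ===== LEMMAS AND PROOFS =====

-- fpvPopLoop, seen through the reversal: on stack = r.reverse it is the simple left recursion
def fpvPopLoopR (r temp : List Int) (cv : Int) : List Int × List Int × Bool :=
  match r with
  | [] => ([], temp, false)
  | v :: rest => if v = cv then (rest, temp, true) else fpvPopLoopR rest (temp ++ [v]) cv

theorem fpvPopLoop_reverse (cv : Int) :
    ∀ (r temp : List Int),
      fpvPopLoop r.reverse temp cv =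
        ((fpvPopLoopR r temp cv).1.reverse, (fpvPopLoopR r temp cv).2) := by
  intro r
  induction r with
  | nil => intro temp; simp [fpvPopLoop, fpvPopLoopR]
  | cons v rest ih =>
    intro temp
    rw [fpvPopLoop]
    have hne : rest.reverse ++ [v] ≠ [] := by simp
    simp only [List.reverse_cons, fpvPopLoopR]
    rw [dif_neg hne]
    simp only [List.getLast_append, List.dropLast_concat]
    by_cases h : v = cv
    · simp [h]
    · simp [h, ih]

theorem fpvMain (cv : Int) :
    ∀ (r temp : List Int),
      (let res := fpvPopLoopR r temp cv
       let stack2 := res.1.reverse ++ res.2.1.reverse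
       if res.2.2 ∧ stack2 ≠ [] then stack2.getLast? else none) =
      (match fpvDelFirst r cv with
       | none => none
       | some rest => (temp ++ rest).head?) := by
  intro r
  induction r with
  | nil => intro temp; simp [fpvPopLoopR, fpvDelFirst]
  | cons v rest ih =>
    intro temp
    by_cases h : v = cv
    · simp only [fpvPopLoopR, fpvDelFirst, if_pos h]
      by_cases hn : rest.reverse ++ temp.reverse = ([] : List Int)
      · have h1 : rest = [] := by
          rcases List.append_eq_nil_iff.mp hn with ⟨h1, _⟩
          simpa using congrArg List.reverse h1
        have h2 : temp = [] := by
          rcases List.append_eq_nil_iff.mp hn with ⟨_, h2⟩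
          simpa using congrArg List.reverse h2
        simp [h1, h2]
      · have he : rest.reverse ++ temp.reverse = (temp ++ rest).reverse := by
          simp [List.reverse_append]
        rw [if_pos (And.intro trivial hn), he, List.getLast?_reverse]
    · simp only [fpvPopLoopR, fpvDelFirst, if_neg h]
      rw [ih (temp ++ [v])]
      cases fpvDelFirst rest cv with
      | none => simp
      | some q => simp

-- ===== VERDICT (by name: the statement is the Claim_ definition above) =====
theorem find_previous_value_spec : Claim_equal_find_previous_value := by
  intro stack cv _
  unfold Spec_find_previous_value find_previous_value find_previous_value_alt
  have hst : stack = stack.reverse.reverse := by simp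
  rw [hst, fpvPopLoop_reverse cv stack.reverse []]
  simpa using fpvMain cv stack.reverse []
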